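-- pv_equiv track=rewrite | github.com/DuyHoang-06/XACML-LAB | xacml-lab/xacml_testcase_ga.py | build_request_xml
-- ===== SOURCE A (Python) =====
-- def build_request_xml(attributes):
--     xml = ['<?xml version="1.0" encoding="UTF-8"?>', '<Request>']
--
--     grouped = {}
--
--     for attr, (value, category) in attributes.items():
--         grouped.setdefault(category, []).append((attr, value))
--
--     for category, items in grouped.items():
--         xml.append(f'  <Attributes Category="{category}">')
--
--         for attr, value in items:
--             xml.append(f'''
--     <Attribute AttributeId="{attr}">
--       <AttributeValue>{value}</AttributeValue>
--     </Attribute>''')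
--
--         xml.append('  </Attributes>')
--
--     xml.append('</Request>')
--     return "\n".join(xml)
-- ===== SOURCE B (Python) =====
-- def build_request_xml(attributes):
--     cats = []
--     for attr, (value, category) in attributes.items():
--         if category not in cats:
--             cats.append(category)
--
--     lines = ['<?xml version="1.0" encoding="UTF-8"?>', '<Request>']
--     for category in cats:
--         lines.append(f'  <Attributes Category="{category}">')
--         for attr, (value, c) in attributes.items():
--             if c == category:
--                 lines.append(f'''
--     <Attribute AttributeId="{attr}">
--       <AttributeValue>{value}</AttributeValue>
--     </Attribute>''')
--         lines.append('  </Attributes>')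
--     lines.append('</Request>')
--     return "\n".join(lines)
-- ===== Notes on version B (the rewrite author's own statement) =====
-- stated objective: alternative
-- what changed: B drops A's grouping dict entirely: one pass collects the distinct categories in first-seen order, then for each category it re-scans the attribute items and emits the matching Attribute blocks directly.
import Mathlib
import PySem

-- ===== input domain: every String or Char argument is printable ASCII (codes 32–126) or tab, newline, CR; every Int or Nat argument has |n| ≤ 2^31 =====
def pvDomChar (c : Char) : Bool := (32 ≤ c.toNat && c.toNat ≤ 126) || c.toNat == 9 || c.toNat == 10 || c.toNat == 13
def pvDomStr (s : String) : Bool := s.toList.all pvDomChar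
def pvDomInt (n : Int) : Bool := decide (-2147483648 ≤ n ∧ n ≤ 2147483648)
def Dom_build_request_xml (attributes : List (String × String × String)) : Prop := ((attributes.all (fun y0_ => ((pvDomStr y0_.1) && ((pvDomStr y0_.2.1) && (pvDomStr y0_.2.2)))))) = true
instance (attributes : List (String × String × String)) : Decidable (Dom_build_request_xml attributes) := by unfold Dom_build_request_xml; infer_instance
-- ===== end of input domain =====

-- B replaces A's grouping dict by a distinct-category scan plus one re-scan of the
-- items per category (alternative decomposition, same output).

-- the f-string literal '\n    <Attribute AttributeId="{attr}">\n      <AttributeValue>{value}</AttributeValue>\n    </Attribute>' (shared formatting constant)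
def pvAttrBlock (attr value : String) : String :=
  "\n    <Attribute AttributeId=\"" ++ attr ++ "\">\n      <AttributeValue>" ++ value ++ "</AttributeValue>\n    </Attribute>"

-- ===== PORT A =====
def build_request_xml (attributes : List (String × String × String)) : String :=
  let xml : List String := ["<?xml version=\"1.0\" encoding=\"UTF-8\"?>", "<Request>"]
  -- grouped.setdefault(category, []).append((attr, value))  ==  grouped[category] = grouped.get(category, []) + [(attr, value)]
  let grouped : PySem.Dict String (List (String × String)) :=
    attributes.foldl (fun d t => d.modify t.2.2 [] (· ++ [(t.1, t.2.1)])) PySem.Dict.empty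
  let xml := grouped.items.foldl (fun xml ci =>
    let xml := xml ++ ["  <Attributes Category=\"" ++ ci.1 ++ "\">"]
    let xml := ci.2.foldl (fun xml av => xml ++ [pvAttrBlock av.1 av.2]) xml
    xml ++ ["  </Attributes>"]) xml
  PySem.Str.join "\n" (xml ++ ["</Request>"])

-- ===== PORT B =====
def build_request_xml_alt (attributes : List (String × String × String)) : String :=
  let cats : List String :=
    attributes.foldl (fun cats t => if t.2.2 ∈ cats then cats else cats ++ [t.2.2]) []
  let lines : List String := ["<?xml version=\"1.0\" encoding=\"UTF-8\"?>", "<Request>"]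
  let lines := cats.foldl (fun lines category =>
    let lines := lines ++ ["  <Attributes Category=\"" ++ category ++ "\">"]
    let lines := attributes.foldl
      (fun lines t => if t.2.2 = category then lines ++ [pvAttrBlock t.1 t.2.1] else lines) lines
    lines ++ ["  </Attributes>"]) lines
  PySem.Str.join "\n" (lines ++ ["</Request>"])

-- ===== PRECONDITION & SPEC =====
-- Pre_ excludes association lists with duplicate attribute ids: A's parameter is a Python
-- dict, which cannot hold duplicate keys (they silently collapse to the last value), so the
-- port's behaviour on such lists corresponds to no dict input.
def Pre_build_request_xml (attributes : List (String × String × String)) : Prop :=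
  (attributes.map (·.1)).Nodup
instance (attributes : List (String × String × String)) : Decidable (Pre_build_request_xml attributes) := by unfold Pre_build_request_xml; infer_instance
def pvWitness_build_request_xml : (List (String × String × String)) :=
  [("subject-id", "alice", "subject"), ("action-id", "read", "action"), ("role", "admin", "subject")]
def Spec_build_request_xml (attributes : List (String × String × String)) (out : String) : Prop := out = build_request_xml_alt attributes
instance (attributes : List (String × String × String)) (out : String) : Decidable (Spec_build_request_xml attributes out) := by unfold Spec_build_request_xml; infer_instance

-- ===== CLAIM (what is proved, stated in full; the proofs are below) =====
def Claim_equal_build_request_xml : Prop := ∀ (attributes : List (String × String × String)), Dom_build_request_xml attributes → Pre_build_request_xml attributes → Spec_build_request_xml attributes (build_request_xml attributes)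

-- ===== LEMMAS AND PROOFS =====

-- B's distinct-category accumulator is PySem.Set.update [] of the category projection
theorem cats_eq_update (l : List (String × String × String)) :
    l.foldl (fun cats t => if t.2.2 ∈ cats then cats else cats ++ [t.2.2]) [] =
      PySem.Set.update [] (l.map (·.2.2)) := by
  unfold PySem.Set.update
  rw [List.foldl_map]
  exact PySem.List.foldl_congr_mem _ _ _ _ (fun acc x _ => by
    by_cases h : x.2.2 ∈ acc <;> simp [PySem.Set.add, PySem.Set.contains, h])

theorem build_request_xml_equal (l : List (String × String × String)) :
    build_request_xml l = build_request_xml_alt l := by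
  unfold build_request_xml build_request_xml_alt
  simp only [cats_eq_update l]
  -- name the grouped dict and characterise its items
  set grouped : PySem.Dict String (List (String × String)) :=
    l.foldl (fun d t => d.modify t.2.2 [] (· ++ [(t.1, t.2.1)])) PySem.Dict.empty with hg
  have hfold : grouped =
      (l.map (fun t => (t.2.2, (t.1, t.2.1)))).foldl
        (fun d p => d.modify p.1 [] (· ++ [p.2])) PySem.Dict.empty := by
    rw [hg, List.foldl_map]
  have hkeys : grouped.keys = PySem.Set.update [] (l.map (·.2.2)) := by
    rw [hg, PySem.Dict.keys_foldl_modify_key]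
    simp [PySem.Dict.empty]
  have hnodup : grouped.keys.Nodup := by
    rw [hg]
    exact PySem.Dict.nodup_keys_foldl_modify_key l (·.2.2) [] _ PySem.Dict.empty
      (by simp [PySem.Dict.empty, PySem.Dict.keys])
  have hgetD : ∀ c, grouped.getD c [] =
      (l.filter (fun t => t.2.2 == c)).map (fun t => (t.1, t.2.1)) := by
    intro c
    rw [hfold, PySem.Dict.getD_foldl_modify_append]
    simp [PySem.Dict.getD_empty, List.filter_map, Function.comp_def]
  have hitems : grouped.items =
      (PySem.Set.update [] (l.map (·.2.2))).map
        (fun c => (c, (l.filter (fun t => t.2.2 == c)).map (fun t => (t.1, t.2.1)))) := by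
    rw [PySem.Dict.items_eq_map_keys grouped hnodup [], hkeys]
    exact List.map_congr_left (fun c _ => by rw [hgetD c])
  rw [hitems]
  -- both sides are now folds over the same category list; compare per category
  congr 1
  congr 1
  rw [List.foldl_map]
  refine PySem.List.foldl_congr_mem _ _ _ _ (fun acc c _ => ?_)
  simp only
  congr 1
  rw [PySem.List.foldl_append_singleton_eq_map]
  have : l.foldl (fun lines t => if t.2.2 = c then lines ++ [pvAttrBlock t.1 t.2.1] else lines)
           (acc ++ ["  <Attributes Category=\"" ++ c ++ "\">"]) =
         (acc ++ ["  <Attributes Category=\"" ++ c ++ "\">"]) ++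
           (l.filter (fun t => decide (t.2.2 = c))).map (fun t => pvAttrBlock t.1 t.2.1) :=
    PySem.List.foldl_append_ite (fun t => t.2.2 = c) (fun t => pvAttrBlock t.1 t.2.1) l _
  rw [this]
  have hf : l.filter (fun t => decide (t.2.2 = c)) = l.filter (fun t => t.2.2 == c) :=
    List.filter_congr (fun t _ => by rw [Bool.eq_iff_iff]; simp [beq_iff_eq])
  rw [hf]
  simp [List.map_map, Function.comp_def]

-- ===== VERDICT (by name: the statement is the Claim_ definition above) =====
theorem build_request_xml_spec : Claim_equal_build_request_xml := by
  intro attributes _ _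
  unfold Spec_build_request_xml
  exact build_request_xml_equal attributes
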